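-- pv_equiv track=rewrite | github.com/chempik1234/metal_gear_clone | base_functions.py | multiply_level
-- ===== SOURCE A (Python) =====
-- def multiply_level(level, ver, hor, unit_symb, floor):
--     res = []
--     for row in range(len(level)):
--         for yy in range(ver):
--             res.append([])
--             for cell in range(len(level[row])):
--                 symb = level[row][cell]
--                 for xxx in range(hor):
--                     if symb not in unit_symb:
--                         res[-1].append(symb)
--                         continue
--                     bool = True
--                     if yy > 0 and res[-2][cell * hor + xxx] == symb:
--                         bool = False
--                     if xxx > 0 and res[-1][-1] == symb:
--                         bool = False
--                     if xxx > 0 and yy > 0: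
--                         if res[-2][cell * hor + xxx - 1] == symb:
--                             bool = False
--                     if bool:
--                         res[-1].append(symb)
--                     else:
--                         res[-1].append(floor)
--                     #if res and res[-1] not in unit_symb:
--                     #    if yy > 0 and res[-2][cell * xxx] != level[row][cell] or yy == 0:
--                     #        res[-1].append(level[row][cell])
--                     #    else:
--                     #        res[-1].append(floor)
--                     #else:
--                     #    res[-1].append(floor)
--     return res
-- ===== SOURCE B (Python) =====
-- def multiply_level(level, ver, hor, unit_symb, floor):
--     # phase 1: plain replication of rows (ver times) and cells (hor times)
--     grid = [[s for s in srow for _ in range(hor)] for srow in level for _ in range(ver)]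
--     # phase 2: one row-major scan; decorate unit symbols against already-decorated
--     # up/left/diagonal neighbours, with block boundaries derived from gr%ver / gx%hor
--     out = []
--     for gr, raw in enumerate(grid):
--         prev = out[-1] if gr % ver else None
--         cur = []
--         for gx, symb in enumerate(raw):
--             if symb in unit_symb and (
--                     (prev is not None and prev[gx] == symb)
--                     or (gx % hor and cur[-1] == symb)
--                     or (prev is not None and gx % hor and prev[gx - 1] == symb)):
--                 cur.append(floor)
--             else:
--                 cur.append(symb)
--         out.append(cur)
--     return out
-- ===== Notes on version B (the rewrite author's own statement) =====
-- stated objective: alternative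
-- what changed: A interleaves replication and decoration in four nested loops that append into the growing result via negative indexing (res[-1], res[-2]) and block indices cell*hor+xxx; B first builds the fully replicated raw grid by plain comprehension and then decorates it in a single row-major scan, deriving block boundaries from gr%ver and gc%hor.
import Mathlib
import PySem

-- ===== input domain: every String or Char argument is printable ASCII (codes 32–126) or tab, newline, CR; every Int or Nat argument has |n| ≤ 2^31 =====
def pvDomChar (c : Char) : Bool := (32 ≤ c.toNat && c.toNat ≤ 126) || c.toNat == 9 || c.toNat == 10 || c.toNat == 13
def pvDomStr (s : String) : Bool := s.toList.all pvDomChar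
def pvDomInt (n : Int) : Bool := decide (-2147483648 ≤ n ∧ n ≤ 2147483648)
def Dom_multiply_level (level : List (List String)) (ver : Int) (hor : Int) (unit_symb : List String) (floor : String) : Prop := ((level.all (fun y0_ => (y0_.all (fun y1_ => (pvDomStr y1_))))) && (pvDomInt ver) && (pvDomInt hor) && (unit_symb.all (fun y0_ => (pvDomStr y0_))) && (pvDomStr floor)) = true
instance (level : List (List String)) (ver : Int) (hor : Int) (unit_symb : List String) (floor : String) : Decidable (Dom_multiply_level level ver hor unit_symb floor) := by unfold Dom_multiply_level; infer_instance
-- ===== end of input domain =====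

-- B replaces A's four nested block-replication loops by two phases (raw replication, then one
-- row-major decorating scan using %-arithmetic for block boundaries); same result, proved equal below.

-- ===== PORT A =====
def pvAppendLast (res : List (List String)) (x : String) : List (List String) :=
  res.dropLast ++ [(res.getLast?.getD []) ++ [x]]

def pvAxxxBody (unit_symb : List String) (floor : String) (hor yy cell : Int) (symb : String)
    (res : List (List String)) (xxx : Int) : List (List String) :=
  if ¬ (unit_symb.contains symb) then pvAppendLast res symb
  else
    let b := true
    let b := if (decide (0 < yy) && (PySem.List.pyGetD (PySem.List.pyGetD res (-2) []) (cell * hor + xxx) "" == symb)) then false else b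
    let b := if (decide (0 < xxx) && (PySem.List.pyGetD (PySem.List.pyGetD res (-1) []) (-1) "" == symb)) then false else b
    let b := if (decide (0 < xxx) && decide (0 < yy) && (PySem.List.pyGetD (PySem.List.pyGetD res (-2) []) (cell * hor + xxx - 1) "" == symb)) then false else b
    if b then pvAppendLast res symb else pvAppendLast res floor

def pvAcell (unit_symb : List String) (floor : String) (hor yy : Int) (srow : List String)
    (res : List (List String)) (cell : Int) : List (List String) :=
  let symb := PySem.List.pyGetD srow cell ""
  (PySem.List.pyRange 0 hor 1).foldl (pvAxxxBody unit_symb floor hor yy cell symb) res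

def multiply_level (level : List (List String)) (ver : Int) (hor : Int) (unit_symb : List String) (floor : String) : List (List String) :=
  (PySem.List.pyRange 0 (level.length : Int) 1).foldl (fun res row =>
    (PySem.List.pyRange 0 ver 1).foldl (fun res yy =>
      (PySem.List.pyRange 0 ((PySem.List.pyGetD level row []).length : Int) 1).foldl
        (pvAcell unit_symb floor hor yy (PySem.List.pyGetD level row [])) (res ++ [[]])) res) []

-- ===== PORT B =====
def pvAltRow (hor : Int) (unit_symb : List String) (floor : String)
    (prev : Option (List String)) (raw : List String) : List String :=
  (PySem.List.enumerate raw 0).foldl (fun cur p =>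
    let gc := p.1
    let symb := p.2
    if unit_symb.contains symb &&
        ((match prev with
          | some pr => PySem.List.pyGetD pr gc "" == symb
          | none => false)
         || (decide (PySem.Int.mod gc hor ≠ 0) && (PySem.List.pyGetD cur (-1) "" == symb))
         || (match prev with
             | some pr => decide (PySem.Int.mod gc hor ≠ 0) && (PySem.List.pyGetD pr (gc - 1) "" == symb)
             | none => false))
    then cur ++ [floor] else cur ++ [symb]) []

def multiply_level_alt (level : List (List String)) (ver : Int) (hor : Int) (unit_symb : List String) (floor : String) : List (List String) :=
  let grid := level.flatMap (fun srow =>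
    (PySem.List.pyRange 0 ver 1).map (fun _ =>
      srow.flatMap (fun s => (PySem.List.pyRange 0 hor 1).map (fun _ => s))))
  (PySem.List.enumerate grid 0).foldl (fun out p =>
    let prev := if PySem.Int.mod p.1 ver ≠ 0 then some (PySem.List.pyGetD out (-1) []) else none
    out ++ [pvAltRow hor unit_symb floor prev p.2]) []

-- proof-side named copies of the two fold bodies of port B

-- ===== PRECONDITION & SPEC =====
def Spec_multiply_level (level : List (List String)) (ver : Int) (hor : Int) (unit_symb : List String) (floor : String) (out : List (List String)) : Prop := out = multiply_level_alt level ver hor unit_symb floor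
instance (level : List (List String)) (ver : Int) (hor : Int) (unit_symb : List String) (floor : String) (out : List (List String)) : Decidable (Spec_multiply_level level ver hor unit_symb floor out) := by unfold Spec_multiply_level; infer_instance

-- ===== CLAIM (what is proved, stated in full; the proofs are below) =====
def Claim_equal_multiply_level : Prop := ∀ (level : List (List String)) (ver : Int) (hor : Int) (unit_symb : List String) (floor : String), Dom_multiply_level level ver hor unit_symb floor → Spec_multiply_level level ver hor unit_symb floor (multiply_level level ver hor unit_symb floor)

-- ===== LEMMAS AND PROOFS =====
-- Both ports are reduced to one canonical computation (pvCanonTop): per output row a left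
-- fold appending each decorated cell, with the previous decorated row threaded through.

def pvCellVal (U : List String) (F : String) (prevO : Option (List String))
    (cur : List String) (c : String × Bool) : String :=
  if U.contains c.1 &&
      ((prevO.elim false fun pr => pr.getD cur.length "" == c.1)
       || (c.2 && (cur.getLast?.getD "" == c.1))
       || (prevO.elim false fun pr => c.2 && (pr.getD (cur.length - 1) "" == c.1)))
  then F else c.1

def pvCanonFrom (U : List String) (F : String) (prevO : Option (List String))
    (cur : List String) (cs : List (String × Bool)) : List String :=
  cs.foldl (fun cur c => cur ++ [pvCellVal U F prevO cur c]) cur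

def pvCells (hor : Int) (srow : List String) : List (String × Bool) :=
  srow.flatMap (fun s => (PySem.List.pyRange 0 hor 1).map (fun k => (s, decide (0 < k))))

def pvCanonTop (U : List String) (F : String) (ver hor : Int) (level : List (List String)) : List (List String) :=
  level.foldl (fun out srow =>
    (PySem.List.pyRange 0 ver 1).foldl (fun out yy =>
      out ++ [pvCanonFrom U F (if 0 < yy then some (out.getLast?.getD []) else none) [] (pvCells hor srow)]) out) []

def pvBbody (hor : Int) (U : List String) (F : String) (prev : Option (List String))
    (cur : List String) (p : Int × String) : List String :=
  if U.contains p.2 &&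
      ((match prev with
        | some pr => PySem.List.pyGetD pr p.1 "" == p.2
        | none => false)
       || (decide (PySem.Int.mod p.1 hor ≠ 0) && (PySem.List.pyGetD cur (-1) "" == p.2))
       || (match prev with
           | some pr => decide (PySem.Int.mod p.1 hor ≠ 0) && (PySem.List.pyGetD pr (p.1 - 1) "" == p.2)
           | none => false))
  then cur ++ [F] else cur ++ [p.2]

def pvExpand (hor : Int) (srow : List String) : List String :=
  srow.flatMap (fun s => (PySem.List.pyRange 0 hor 1).map (fun _ => s))

def pvBtop (ver hor : Int) (U : List String) (F : String)
    (out : List (List String)) (p : Int × List String) : List (List String) :=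
  out ++ [pvAltRow hor U F (if PySem.Int.mod p.1 ver ≠ 0 then some (PySem.List.pyGetD out (-1) []) else none) p.2]

lemma pvCanonFrom_length (U : List String) (F : String) (prevO : Option (List String)) :
    ∀ (cs : List (String × Bool)) (cur : List String),
    (pvCanonFrom U F prevO cur cs).length = cur.length + cs.length := by
  intro cs
  induction cs with
  | nil => simp [pvCanonFrom]
  | cons c cs ih =>
    intro cur
    simp only [pvCanonFrom, List.foldl_cons] at *
    rw [ih]
    simp
    omega

lemma pvAppendLast_concat (res : List (List String)) (cur : List String) (x : String) :
    pvAppendLast (res ++ [cur]) x = res ++ [cur ++ [x]] := by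
  unfold pvAppendLast; simp

lemma pvGetD_neg_one' (xs : List String) (d : String) :
    PySem.List.pyGetD xs (-1) d = xs.getLast?.getD d := by
  rcases xs.eq_nil_or_concat with h | ⟨l, p, rfl⟩
  · subst h; simp [PySem.List.pyGetD, PySem.List.pyGet?, PySem.List.pyIdx?]
  · simp [PySem.List.pyGetD_neg_one_append_singleton]

lemma pvGetD_neg_two (res : List (List String)) (cur : List String) :
    PySem.List.pyGetD (res ++ [cur]) (-2) [] = res.getLast?.getD [] := by
  rcases res.eq_nil_or_concat with h | ⟨l, p, rfl⟩
  · subst h; simp [PySem.List.pyGetD, PySem.List.pyGet?, PySem.List.pyIdx?]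
  · rw [PySem.List.pyGetD_neg_ofNat _ 2 [] (by omega) (by simp)]
    simp

lemma pvA_step (U : List String) (F : String) (hor yy cell xxx : Int) (symb : String)
    (res : List (List String)) (cur : List String)
    (hh : 0 < hor) (hc : 0 ≤ cell) (hx : 0 ≤ xxx) (hlen : (cur.length : Int) = cell * hor + xxx) :
    pvAxxxBody U F hor yy cell symb (res ++ [cur]) xxx
      = res ++ [cur ++ [pvCellVal U F (if 0 < yy then some (res.getLast?.getD []) else none) cur (symb, decide (0 < xxx))]] := by
  unfold pvAxxxBody pvCellVal
  rw [pvGetD_neg_two, PySem.List.pyGetD_neg_one_append_singleton, pvGetD_neg_one', ← hlen]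
  by_cases hcont : U.contains symb
  · by_cases hy : 0 < yy <;> by_cases hxx : 0 < xxx
    · have h1 : (cur.length : Int) ≥ 1 := by nlinarith
      have hcast : ((cur.length : Int)) - 1 = ((cur.length - 1 : Nat) : Int) := by omega
      rw [hcast, PySem.List.pyGetD_natCast, PySem.List.pyGetD_natCast]
      simp only [hcont, hy, hxx, decide_true, not_true, Bool.true_and, Bool.and_true,
        Option.elim_some, if_pos, ite_false, Bool.not_true, if_true]
      split_ifs <;> simp_all [pvAppendLast_concat] <;> tauto
    · rw [PySem.List.pyGetD_natCast]
      simp only [hcont, hy, hxx, decide_true, decide_false, Bool.true_and, Bool.false_and,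
        Bool.and_false, Bool.or_false, Option.elim_some, if_pos, Bool.and_true]
      split_ifs <;> simp_all [pvAppendLast_concat] <;> tauto
    · simp only [hcont, hy, hxx, decide_true, decide_false, Bool.true_and, Bool.false_and,
        Bool.and_false, Bool.false_or, Bool.or_false, Option.elim_none, if_neg, ite_false]
      split_ifs <;> simp_all [pvAppendLast_concat] <;> tauto
    · simp only [hcont, hy, hxx, decide_true, decide_false, Bool.true_and, Bool.false_and,
        Bool.and_false, Bool.false_or, Bool.or_false, Option.elim_none, if_neg, ite_false]
      split_ifs <;> simp_all [pvAppendLast_concat] <;> tauto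
  · have h : symb ∉ U := by simpa using hcont
    simp [h, pvAppendLast_concat]

lemma pvA_block (U : List String) (F : String) (hor yy cell : Int) (symb : String)
    (hh : 0 < hor) (hc : 0 ≤ cell) :
    ∀ (n : Nat) (a : Int), a + n = hor → 0 ≤ a → ∀ (res : List (List String)) (cur : List String),
    (cur.length : Int) = cell * hor + a →
    (PySem.List.pyRange a hor 1).foldl (pvAxxxBody U F hor yy cell symb) (res ++ [cur])
      = res ++ [pvCanonFrom U F (if 0 < yy then some (res.getLast?.getD []) else none) cur
          ((PySem.List.pyRange a hor 1).map (fun k => (symb, decide (0 < k))))] := by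
  intro n
  induction n with
  | zero =>
    intro a hn _ res cur _
    rw [PySem.List.pyRange_one_eq_nil (by omega)]
    simp [pvCanonFrom]
  | succ n ih =>
    intro a hn ha res cur hlen
    rw [PySem.List.pyRange_one_cons (by omega)]
    simp only [List.foldl_cons, List.map_cons]
    rw [pvA_step U F hor yy cell a symb res cur hh hc ha hlen]
    rw [ih (a + 1) (by omega) (by omega) res _ (by simp [hlen]; omega)]
    simp [pvCanonFrom]

lemma pvA_cells (U : List String) (F : String) (hor yy : Int) (hh : 0 < hor) :
    ∀ (rest : List String) (c0 : Int), 0 ≤ c0 → ∀ (res : List (List String)) (cur : List String),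
    (cur.length : Int) = c0 * hor →
    (PySem.List.enumerate rest c0).foldl
        (fun res p => (PySem.List.pyRange 0 hor 1).foldl (pvAxxxBody U F hor yy p.1 p.2) res) (res ++ [cur])
      = res ++ [pvCanonFrom U F (if 0 < yy then some (res.getLast?.getD []) else none) cur (pvCells hor rest)] := by
  intro rest
  induction rest with
  | nil => intro c0 _ res cur _; simp [pvCells, pvCanonFrom, PySem.List.enumerate_nil]
  | cons s rest ih =>
    intro c0 hc0 res cur hlen
    rw [PySem.List.enumerate_cons]
    simp only [List.foldl_cons]
    rw [pvA_block U F hor yy c0 s hh hc0 hor.toNat 0 (by omega) (by omega) res cur (by omega)]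
    rw [ih (c0 + 1) (by omega) res _ (by rw [pvCanonFrom_length]; simp; ring_nf; omega)]
    have hsplit : pvCells hor (s :: rest) = ((PySem.List.pyRange 0 hor 1).map (fun k => (s, decide (0 < k)))) ++ pvCells hor rest := by
      simp [pvCells]
    rw [hsplit]
    simp [pvCanonFrom, List.foldl_append]

lemma pv_foldl_id {α β : Type} (l : List α) (init : β) : l.foldl (fun r _ => r) init = init := by
  induction l generalizing init with
  | nil => rfl
  | cons x l ih => simpa using ih init

lemma pvA_inner (U : List String) (F : String) (hor yy : Int) (srow : List String) (res : List (List String)) :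
    (PySem.List.pyRange 0 (srow.length : Int) 1).foldl (pvAcell U F hor yy srow) (res ++ [[]])
      = res ++ [pvCanonFrom U F (if 0 < yy then some (res.getLast?.getD []) else none) [] (pvCells hor srow)] := by
  by_cases hh : 0 < hor
  · have h := pvA_cells U F hor yy hh srow 0 le_rfl res [] (by simp)
    rw [PySem.List.enumerate_eq_map_pyRange srow "", List.foldl_map] at h
    simpa [pvAcell] using h
  · have hr : PySem.List.pyRange 0 hor 1 = [] := PySem.List.pyRange_one_eq_nil (by omega)
    have hfm : List.flatMap (fun s : String => List.map (fun k => (s, decide (0 < k))) (PySem.List.pyRange 0 hor 1)) srow = [] := by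
      induction srow <;> simp_all [hr]
    have hid : pvAcell U F hor yy srow = fun res _ => res := by
      funext r c; simp [pvAcell, hr]
    simp [hid, pvCells, pvCanonFrom, pv_foldl_id, hfm]

lemma pvA_eq_canon (level : List (List String)) (ver hor : Int) (U : List String) (F : String) :
    multiply_level level ver hor U F = pvCanonTop U F ver hor level := by
  unfold multiply_level pvCanonTop
  rw [PySem.List.foldl_pyRange_pyGetD' level ([] : List String)
      (fun res srow => (PySem.List.pyRange 0 ver 1).foldl (fun res yy =>
        (PySem.List.pyRange 0 ((srow : List String).length : Int) 1).foldl
          (pvAcell U F hor yy srow) (res ++ [[]])) res) [] (by omega)]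
  simp only [Int.toNat_zero, List.drop_zero]
  congr 1
  funext out srow
  congr 1
  funext res yy
  exact pvA_inner U F hor yy srow res

lemma pvAltRow_eq (hor : Int) (U : List String) (F : String) (prev : Option (List String)) (raw : List String) :
    pvAltRow hor U F prev raw = (PySem.List.enumerate raw 0).foldl (pvBbody hor U F prev) [] := rfl

lemma pvGetD_neg_one2 {α : Type} (xs : List α) (d : α) :
    PySem.List.pyGetD xs (-1) d = xs.getLast?.getD d := by
  rcases xs.eq_nil_or_concat with h | ⟨l, p, rfl⟩
  · subst h; simp [PySem.List.pyGetD, PySem.List.pyGet?, PySem.List.pyIdx?]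
  · simp [PySem.List.pyGetD_neg_one_append_singleton]

lemma pvRange_map_const {α : Type} (h : Int) (c : α) :
    (PySem.List.pyRange 0 h 1).map (fun _ => c) = List.replicate h.toNat c := by
  rw [PySem.List.pyRange_one]
  have hc : ((fun (_ : Int) => c) ∘ fun (k : Nat) => (0 : Int) + ↑k) = fun _ => c := rfl
  rw [List.map_map, hc, List.map_const']
  simp

lemma pvB_step (U : List String) (F : String) (hor : Int) (prevO : Option (List String)) (symb : String)
    (cell xxx : Int) (hh : 0 < hor) (hc : 0 ≤ cell) (hx : 0 ≤ xxx) (hxh : xxx < hor)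
    (cur : List String) (hlen : (cur.length : Int) = cell * hor + xxx) :
    pvBbody hor U F prevO cur (cell * hor + xxx, symb)
      = cur ++ [pvCellVal U F prevO cur (symb, decide (0 < xxx))] := by
  have hmod : PySem.Int.mod (cell * hor + xxx) hor = xxx := by
    rw [PySem.Int.mod_eq_emod_of_pos hh]
    have : cell * hor + xxx = xxx + hor * cell := by ring
    rw [this, Int.add_mul_emod_self_left, Int.emod_eq_of_lt hx hxh]
  have hmod' : PySem.Int.mod (cur.length : Int) hor = xxx := by rw [hlen]; exact hmod
  have hf : (PySem.Int.mod (cur.length : Int) hor ≠ 0) ↔ (0 < xxx) := by rw [hmod']; omega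
  unfold pvBbody pvCellVal
  simp only [← hlen]
  rcases prevO with _ | pr <;> by_cases hxx : 0 < xxx
  · simp only [hf, hxx, decide_true, Option.elim_none, Bool.false_or, Bool.or_false,
      Bool.true_and, pvGetD_neg_one2]
    split_ifs <;> simp_all <;> tauto
  · simp only [hf, hxx, decide_false, Option.elim_none, Bool.false_or, Bool.or_false,
      Bool.false_and, Bool.and_false, pvGetD_neg_one2]
    split_ifs <;> simp_all <;> tauto
  · have h1 : 1 ≤ cur.length := by nlinarith [hlen]
    have hcast : ((cur.length : Int)) - 1 = ((cur.length - 1 : Nat) : Int) := by omega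
    simp only [hf, hxx, decide_true, Option.elim_some, Bool.true_and, Bool.and_true,
      pvGetD_neg_one2, hcast, PySem.List.pyGetD_natCast]
    split_ifs <;> simp_all <;> tauto
  · simp only [hf, hxx, decide_false, Option.elim_some, Bool.false_and, Bool.and_false,
      Bool.or_false, pvGetD_neg_one2, PySem.List.pyGetD_natCast]
    split_ifs <;> simp_all <;> tauto

lemma pvB_block (U : List String) (F : String) (hor : Int) (prevO : Option (List String)) (symb : String)
    (cell : Int) (hh : 0 < hor) (hc : 0 ≤ cell) :
    ∀ (n : Nat) (a : Int), a + n = hor → 0 ≤ a → ∀ (cur : List String),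
    (cur.length : Int) = cell * hor + a →
    (PySem.List.enumerate (List.replicate n symb) (cell * hor + a)).foldl (pvBbody hor U F prevO) cur
      = pvCanonFrom U F prevO cur ((PySem.List.pyRange a hor 1).map (fun k => (symb, decide (0 < k)))) := by
  intro n
  induction n with
  | zero =>
    intro a hn _ cur _
    rw [PySem.List.pyRange_one_eq_nil (by omega)]
    simp [pvCanonFrom, PySem.List.enumerate_nil]
  | succ n ih =>
    intro a hn ha cur hlen
    rw [List.replicate_succ, PySem.List.enumerate_cons, PySem.List.pyRange_one_cons (by omega)]
    simp only [List.foldl_cons, List.map_cons]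
    rw [pvB_step U F hor prevO symb cell a hh hc ha (by omega) cur hlen]
    have harg : cell * hor + a + 1 = cell * hor + (a + 1) := by ring
    rw [harg, ih (a + 1) (by omega) (by omega) _ (by simp; omega)]
    simp [pvCanonFrom]

lemma pvB_row (U : List String) (F : String) (hor : Int) (prevO : Option (List String)) (hh : 0 < hor) :
    ∀ (rest : List String) (c0 : Int), 0 ≤ c0 → ∀ (cur : List String),
    (cur.length : Int) = c0 * hor →
    (PySem.List.enumerate (pvExpand hor rest) (c0 * hor)).foldl (pvBbody hor U F prevO) cur
      = pvCanonFrom U F prevO cur (pvCells hor rest) := by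
  intro rest
  induction rest with
  | nil => intro c0 _ cur _; simp [pvExpand, pvCells, pvCanonFrom, PySem.List.enumerate_nil]
  | cons s rest ih =>
    intro c0 hc0 cur hlen
    have hsplit : pvExpand hor (s :: rest)
        = List.replicate hor.toNat s ++ pvExpand hor rest := by
      simp [pvExpand, pvRange_map_const]
    rw [hsplit, PySem.List.enumerate_append, List.foldl_append]
    rw [show c0 * hor = c0 * hor + 0 by ring]
    rw [pvB_block U F hor prevO s c0 hh hc0 hor.toNat 0 (by omega) le_rfl cur (by omega)]
    have hlen2 : (pvCanonFrom U F prevO cur ((PySem.List.pyRange 0 hor 1).map (fun k => (s, decide (0 < k))))).length = cur.length + hor.toNat := by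
      rw [pvCanonFrom_length]; simp [PySem.List.length_pyRange_one]
    have hstart : c0 * hor + 0 + ((List.replicate hor.toNat s).length : Int) = (c0 + 1) * hor := by
      simp [List.length_replicate]; ring_nf; omega
    rw [hstart, ih (c0 + 1) (by omega) _ (by rw [hlen2]; push_cast; rw [hlen, Int.toNat_of_nonneg (le_of_lt hh)]; ring)]
    have hcells : pvCells hor (s :: rest)
        = ((PySem.List.pyRange 0 hor 1).map (fun k => (s, decide (0 < k)))) ++ pvCells hor rest := by
      simp [pvCells]
    rw [hcells]
    simp [pvCanonFrom, List.foldl_append]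

lemma pvB_rowFull (U : List String) (F : String) (hor : Int) (prevO : Option (List String)) (srow : List String) :
    pvAltRow hor U F prevO (pvExpand hor srow) = pvCanonFrom U F prevO [] (pvCells hor srow) := by
  rw [pvAltRow_eq]
  by_cases hh : 0 < hor
  · have h := pvB_row U F hor prevO hh srow 0 le_rfl [] (by simp)
    simpa using h
  · have hr : PySem.List.pyRange 0 hor 1 = [] := PySem.List.pyRange_one_eq_nil (by omega)
    have hfm : pvExpand hor srow = [] := by
      unfold pvExpand; induction srow <;> simp_all [hr]
    have hfm2 : List.flatMap (fun s : String => List.map (fun k => (s, decide (0 < k))) (PySem.List.pyRange 0 hor 1)) srow = [] := by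
      induction srow <;> simp_all [hr]
    simp [hfm, pvCells, hfm2, pvCanonFrom, PySem.List.enumerate_nil]

lemma pvB_vstep (U : List String) (F : String) (ver hor : Int) (hv : 0 < ver)
    (k a : Int) (hk : 0 ≤ k) (ha : 0 ≤ a) (hav : a < ver) (out : List (List String)) (raw : List String) :
    pvBtop ver hor U F out (ver * k + a, raw)
      = out ++ [pvAltRow hor U F (if 0 < a then some (out.getLast?.getD []) else none) raw] := by
  have hmod : PySem.Int.mod (ver * k + a) ver = a := by
    rw [PySem.Int.mod_eq_emod_of_pos hv]
    have : ver * k + a = a + ver * k := by ring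
    rw [this, Int.add_mul_emod_self_left, Int.emod_eq_of_lt ha hav]
  unfold pvBtop
  simp only [hmod, pvGetD_neg_one2]
  congr 2
  split_ifs <;> first | rfl | omega

lemma pvB_vblock (U : List String) (F : String) (ver hor : Int) (hv : 0 < ver) (srow : List String) :
    ∀ (n : Nat) (a : Int), a + n = ver → 0 ≤ a → ∀ (k : Int), 0 ≤ k → ∀ (out : List (List String)),
    (PySem.List.enumerate (List.replicate n (pvExpand hor srow)) (ver * k + a)).foldl (pvBtop ver hor U F) out
      = (PySem.List.pyRange a ver 1).foldl (fun out yy =>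
          out ++ [pvCanonFrom U F (if 0 < yy then some (out.getLast?.getD []) else none) [] (pvCells hor srow)]) out := by
  intro n
  induction n with
  | zero =>
    intro a hn _ k _ out
    rw [PySem.List.pyRange_one_eq_nil (by omega)]
    simp [PySem.List.enumerate_nil]
  | succ n ih =>
    intro a hn ha k hk out
    rw [List.replicate_succ, PySem.List.enumerate_cons, PySem.List.pyRange_one_cons (by omega)]
    simp only [List.foldl_cons]
    rw [pvB_vstep U F ver hor hv k a hk ha (by omega) out _, pvB_rowFull]
    have harg : ver * k + a + 1 = ver * k + (a + 1) := by ring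
    rw [harg, ih (a + 1) (by omega) (by omega) k hk]

lemma pvB_top_gen (U : List String) (F : String) (ver hor : Int) (hv : 0 < ver) :
    ∀ (lvl : List (List String)) (k : Int), 0 ≤ k → ∀ (out : List (List String)),
    (PySem.List.enumerate (lvl.flatMap (fun srow => List.replicate ver.toNat (pvExpand hor srow))) (ver * k)).foldl
        (pvBtop ver hor U F) out
      = lvl.foldl (fun out srow =>
          (PySem.List.pyRange 0 ver 1).foldl (fun out yy =>
            out ++ [pvCanonFrom U F (if 0 < yy then some (out.getLast?.getD []) else none) [] (pvCells hor srow)]) out) out := by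
  intro lvl
  induction lvl with
  | nil => intro k _ out; simp [PySem.List.enumerate_nil]
  | cons srow lvl ih =>
    intro k hk out
    simp only [List.flatMap_cons, List.foldl_cons]
    rw [PySem.List.enumerate_append, List.foldl_append]
    rw [show ver * k = ver * k + 0 by ring]
    rw [pvB_vblock U F ver hor hv srow ver.toNat 0 (by omega) le_rfl k hk out]
    have hstart : ver * k + 0 + ((List.replicate ver.toNat (pvExpand hor srow)).length : Int) = ver * (k + 1) := by
      simp [List.length_replicate, Int.toNat_of_nonneg (le_of_lt hv)]; ring
    rw [hstart, ih (k + 1) (by omega)]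

lemma pvB_eq_canon (level : List (List String)) (ver hor : Int) (U : List String) (F : String) :
    multiply_level_alt level ver hor U F = pvCanonTop U F ver hor level := by
  show (PySem.List.enumerate (level.flatMap (fun srow =>
      (PySem.List.pyRange 0 ver 1).map (fun _ => pvExpand hor srow))) 0).foldl (pvBtop ver hor U F) [] = _
  unfold pvCanonTop
  by_cases hv : 0 < ver
  · have hgrid : level.flatMap (fun srow => (PySem.List.pyRange 0 ver 1).map (fun _ => pvExpand hor srow))
        = level.flatMap (fun srow => List.replicate ver.toNat (pvExpand hor srow)) := by
      simp [pvRange_map_const]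
    rw [hgrid]
    have h := pvB_top_gen U F ver hor hv level 0 le_rfl []
    simpa using h
  · have hr : PySem.List.pyRange 0 ver 1 = [] := PySem.List.pyRange_one_eq_nil (by omega)
    have hfm : List.flatMap (fun srow : List String => List.map (fun _ => pvExpand hor srow) (PySem.List.pyRange 0 ver 1)) level = [] := by
      induction level <;> simp_all [hr]
    have hfm2 : List.flatMap (fun _ : List String => ([] : List (List String))) level = [] := by
      induction level <;> simp_all
    simp [hfm, hr, pv_foldl_id, PySem.List.enumerate_nil, hfm2]

-- ===== VERDICT (by name: the statement is the Claim_ definition above) =====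
theorem multiply_level_spec : Claim_equal_multiply_level := by
  intro level ver hor U F _
  unfold Spec_multiply_level
  rw [pvA_eq_canon, pvB_eq_canon]
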